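-- pv_equiv track=rewrite | github.com/aalrabah/PredAct_bench | tod.py | build_student_query
-- ===== SOURCE A (Python) =====
-- def build_student_query(tool_results):
--     """Build student_query from tool results. Filled at PHASE_RISK."""
--     flagged = [r for r in tool_results.get("student_results", []) if r["failure_risk"] is not None]
--
--     if not flagged:
--         return {
--             "student_identifier_type": "",
--             "predicted_grade_filter": "unknown",
--             "assignment_issue_filter": "no_issue",
--         }
--
--     # Determine the filter based on what grades are predicted for flagged students
--     predicted_grades = set(r["predicted_grade"] for r in flagged)
--     if "f" in predicted_grades:
--         grade_filter = "below_d"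
--     elif "d" in predicted_grades:
--         grade_filter = "below_c"
--     elif "c" in predicted_grades:
--         grade_filter = "below_b"
--     else:
--         grade_filter = "unknown"
--
--     # Determine assignment issue filter
--     reasons = [r["failure_risk_reason"] for r in flagged]
--     if all(r == "missing_work" for r in reasons):
--         issue_filter = "missing_multiple"
--     elif all(r == "academic_underpreparedness" for r in reasons):
--         issue_filter = "no_issue"
--     elif any(r == "missing_work" for r in reasons):
--         issue_filter = "missing_multiple"
--     else:
--         issue_filter = "unknown"
--
--     return {
--         "student_identifier_type": "student_id",
--         "predicted_grade_filter": grade_filter,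
--         "assignment_issue_filter": issue_filter,
--     }
-- ===== SOURCE B (Python) =====
-- def build_student_query(tool_results):
--     """Build student_query from tool results. Filled at PHASE_RISK."""
--     rank = {"f": 3, "d": 2, "c": 1}
--     severity = 0
--     has_missing = False
--     all_academic = True
--     any_flagged = False
--     for r in tool_results.get("student_results", []):
--         if r["failure_risk"] is None:
--             continue
--         any_flagged = True
--         severity = max(severity, rank.get(r["predicted_grade"], 0))
--         reason = r["failure_risk_reason"]
--         if reason == "missing_work":
--             has_missing = True
--         if reason != "academic_underpreparedness":
--             all_academic = False
--     if not any_flagged: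
--         return {
--             "student_identifier_type": "",
--             "predicted_grade_filter": "unknown",
--             "assignment_issue_filter": "no_issue",
--         }
--     grade_filter = {3: "below_d", 2: "below_c", 1: "below_b"}.get(severity, "unknown")
--     if all_academic:
--         issue_filter = "no_issue"
--     elif has_missing:
--         issue_filter = "missing_multiple"
--     else:
--         issue_filter = "unknown"
--     return {
--         "student_identifier_type": "student_id",
--         "predicted_grade_filter": grade_filter,
--         "assignment_issue_filter": issue_filter,
--     }
-- ===== Notes on version B (the rewrite author's own statement) =====
-- stated objective: simpler
-- what changed: Replaces A's list comprehension plus four separate full passes (set build + three membership tests, all/all/any over a reasons list) with one single pass that accumulates a max grade severity and two booleans, the redundant 'all missing_work' branch collapsing into 'any missing_work'.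
import Mathlib
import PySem

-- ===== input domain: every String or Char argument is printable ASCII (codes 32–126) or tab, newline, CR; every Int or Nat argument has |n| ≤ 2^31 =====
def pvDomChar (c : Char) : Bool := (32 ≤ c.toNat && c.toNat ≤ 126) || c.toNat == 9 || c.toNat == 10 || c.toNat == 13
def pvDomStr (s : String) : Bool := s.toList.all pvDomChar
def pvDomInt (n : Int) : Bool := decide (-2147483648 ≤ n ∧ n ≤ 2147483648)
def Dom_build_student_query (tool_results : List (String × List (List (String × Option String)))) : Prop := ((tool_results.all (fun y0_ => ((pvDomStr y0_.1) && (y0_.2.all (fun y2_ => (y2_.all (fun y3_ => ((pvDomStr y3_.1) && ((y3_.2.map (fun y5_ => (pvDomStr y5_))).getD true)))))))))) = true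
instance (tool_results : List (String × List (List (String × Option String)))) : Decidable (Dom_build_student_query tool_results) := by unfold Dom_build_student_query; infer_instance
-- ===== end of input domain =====

-- B replaces A's list comprehension plus four separate passes (set build + three membership
-- tests, all/all/any over a reasons list) by one single accumulating pass; same return value on Pre_.

-- ===== PORT A =====
def build_student_query (tool_results : List (String × List (List (String × Option String)))) : List (String × String) :=
  -- flagged = [r for r in tool_results.get("student_results", []) if r["failure_risk"] is not None]
  -- (record subscripts via getD: exact under Pre_, which excludes exactly the KeyError inputs)
  let flagged := ((PySem.Dict.mk tool_results).getD "student_results" []).filter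
      (fun r => ((PySem.Dict.mk r).getD "failure_risk" none).isSome)
  if flagged.isEmpty then
    [("student_identifier_type", ""), ("predicted_grade_filter", "unknown"), ("assignment_issue_filter", "no_issue")]
  else
    let predicted_grades : PySem.Set (Option String) :=
      PySem.Set.ofList (flagged.map (fun r => (PySem.Dict.mk r).getD "predicted_grade" none))
    let grade_filter :=
      if predicted_grades.contains (some "f") then "below_d"
      else if predicted_grades.contains (some "d") then "below_c"
      else if predicted_grades.contains (some "c") then "below_b"
      else "unknown"
    let reasons := flagged.map (fun r => (PySem.Dict.mk r).getD "failure_risk_reason" none)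
    let issue_filter :=
      if reasons.all (fun r => r == some "missing_work") then "missing_multiple"
      else if reasons.all (fun r => r == some "academic_underpreparedness") then "no_issue"
      else if reasons.any (fun r => r == some "missing_work") then "missing_multiple"
      else "unknown"
    [("student_identifier_type", "student_id"), ("predicted_grade_filter", grade_filter), ("assignment_issue_filter", issue_filter)]

-- ===== PORT B =====
-- loop body; state: (severity, has_missing, all_academic, any_flagged)
def bsqStep (st : Nat × Bool × Bool × Bool) (r : List (String × Option String)) : Nat × Bool × Bool × Bool :=
  if ((PySem.Dict.mk r).getD "failure_risk" none).isSome then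
    -- rank.get(r["predicted_grade"], 0), rank = {"f":3,"d":2,"c":1}: the looked-up value is an
    -- Optional string, the keys are plain strings, so this match is exact
    let g := (PySem.Dict.mk r).getD "predicted_grade" none
    let sev := if g == some "f" then 3 else if g == some "d" then 2 else if g == some "c" then 1 else 0
    let reason := (PySem.Dict.mk r).getD "failure_risk_reason" none
    (max st.1 sev,
     st.2.1 || (reason == some "missing_work"),
     st.2.2.1 && (reason == some "academic_underpreparedness"),
     true)
  else st

def build_student_query_alt (tool_results : List (String × List (List (String × Option String)))) : List (String × String) :=
  let st := ((PySem.Dict.mk tool_results).getD "student_results" []).foldl bsqStep (0, false, true, false)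
  if !st.2.2.2 then
    [("student_identifier_type", ""), ("predicted_grade_filter", "unknown"), ("assignment_issue_filter", "no_issue")]
  else
    -- {3: "below_d", 2: "below_c", 1: "below_b"}.get(severity, "unknown")
    let grade_filter :=
      if st.1 == 3 then "below_d" else if st.1 == 2 then "below_c" else if st.1 == 1 then "below_b" else "unknown"
    let issue_filter := if st.2.2.1 then "no_issue" else if st.2.1 then "missing_multiple" else "unknown"
    [("student_identifier_type", "student_id"), ("predicted_grade_filter", grade_filter), ("assignment_issue_filter", issue_filter)]

-- ===== PRECONDITION & SPEC =====
-- Pre_ excludes exactly the KeyError inputs, on which A raises: a record in student_results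
-- without a "failure_risk" key, or a flagged record without "predicted_grade" or "failure_risk_reason".
def Pre_build_student_query (tool_results : List (String × List (List (String × Option String)))) : Prop :=
  ∀ r ∈ (PySem.Dict.mk tool_results).getD "student_results" [],
    (PySem.Dict.mk r).contains "failure_risk" = true ∧
    (((PySem.Dict.mk r).getD "failure_risk" none).isSome = true →
      (PySem.Dict.mk r).contains "predicted_grade" = true ∧
      (PySem.Dict.mk r).contains "failure_risk_reason" = true)
instance (tool_results : List (String × List (List (String × Option String)))) : Decidable (Pre_build_student_query tool_results) := by unfold Pre_build_student_query; infer_instance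

def pvWitness_build_student_query : (List (String × List (List (String × Option String)))) :=
  [("student_results", [[("failure_risk", some "high"), ("predicted_grade", some "d"), ("failure_risk_reason", some "missing_work")],
                        [("failure_risk", none)]])]

def Spec_build_student_query (tool_results : List (String × List (List (String × Option String)))) (out : List (String × String)) : Prop := out = build_student_query_alt tool_results
instance (tool_results : List (String × List (List (String × Option String)))) (out : List (String × String)) : Decidable (Spec_build_student_query tool_results out) := by unfold Spec_build_student_query; infer_instance

-- ===== CLAIM (what is proved, stated in full; the proofs are below) =====
def Claim_equal_build_student_query : Prop := ∀ (tool_results : List (String × List (List (String × Option String)))), Dom_build_student_query tool_results → Pre_build_student_query tool_results → Spec_build_student_query tool_results (build_student_query tool_results)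

-- ===== LEMMAS AND PROOFS =====

-- proof-side names for the three record fields and the grade rank
def pvFl (r : List (String × Option String)) : Bool := ((PySem.Dict.mk r).getD "failure_risk" none).isSome
def pvGr (r : List (String × Option String)) : Option String := (PySem.Dict.mk r).getD "predicted_grade" none
def pvRs (r : List (String × Option String)) : Option String := (PySem.Dict.mk r).getD "failure_risk_reason" none
def pvSev (r : List (String × Option String)) : Nat :=
  if pvGr r == some "f" then 3 else if pvGr r == some "d" then 2 else if pvGr r == some "c" then 1 else 0

theorem pvSev_le (r : List (String × Option String)) : pvSev r ≤ 3 := by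
  unfold pvSev; split_ifs <;> omega

theorem pvSev_eq_3 (r : List (String × Option String)) : pvSev r = 3 ↔ pvGr r = some "f" := by
  unfold pvSev; split_ifs with h1 h2 h3 <;> simp_all

theorem pvSev_eq_2 (r : List (String × Option String)) : pvSev r = 2 ↔ pvGr r = some "d" := by
  unfold pvSev; split_ifs with h1 h2 h3 <;> simp_all

theorem pvSev_eq_1 (r : List (String × Option String)) : pvSev r = 1 ↔ pvGr r = some "c" := by
  unfold pvSev; split_ifs with h1 h2 h3 <;> simp_all

-- the single pass of B, characterised over the filtered (flagged) list
theorem bsq_fold (l : List (List (String × Option String))) (s : Nat) (hm aa af : Bool) :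
    l.foldl bsqStep (s, hm, aa, af) =
      ((l.filter pvFl).foldl (fun a r => max a (pvSev r)) s,
       hm || (l.filter pvFl).any (fun r => pvRs r == some "missing_work"),
       aa && (l.filter pvFl).all (fun r => pvRs r == some "academic_underpreparedness"),
       af || !(l.filter pvFl).isEmpty) := by
  induction l generalizing s hm aa af with
  | nil => simp
  | cons x xs ih =>
    simp only [List.foldl_cons, List.filter_cons]
    by_cases h : pvFl x = true
    · rw [if_pos h]
      have hstep : bsqStep (s, hm, aa, af) x =
          (max s (pvSev x), hm || (pvRs x == some "missing_work"),
           aa && (pvRs x == some "academic_underpreparedness"), true) := by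
        simp only [bsqStep]
        rw [if_pos (show ((PySem.Dict.mk x).getD "failure_risk" none).isSome = true from h)]
        rfl
      rw [hstep, ih]
      simp [Bool.or_assoc, Bool.and_assoc]
    · rw [if_neg h]
      have hstep : bsqStep (s, hm, aa, af) x = (s, hm, aa, af) := by
        simp only [bsqStep]
        rw [if_neg (show ¬ ((PySem.Dict.mk x).getD "failure_risk" none).isSome = true from h)]
      rw [hstep, ih]

theorem foldl_max_comm (xs : List Nat) (s : Nat) : xs.foldl max s = max s (xs.foldl max 0) := by
  induction xs generalizing s with
  | nil => simp
  | cons x xs ih =>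
    simp only [List.foldl_cons, Nat.zero_max]
    rw [ih (max s x), ih x, Nat.max_assoc]

theorem max_rank (xs : List Nat) (h : ∀ x ∈ xs, x ≤ 3) :
    xs.foldl max 0 = if 3 ∈ xs then 3 else if 2 ∈ xs then 2 else if 1 ∈ xs then 1 else 0 := by
  induction xs with
  | nil => simp
  | cons x xs ih =>
    have hx : x ≤ 3 := h x (by simp)
    have hF := ih (fun y hy => h y (by simp [hy]))
    simp only [List.foldl_cons, List.mem_cons, Nat.zero_max]
    rw [foldl_max_comm, hF]
    by_cases h3 : 3 ∈ xs <;> by_cases h2 : 2 ∈ xs <;> by_cases h1 : 1 ∈ xs <;>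
      interval_cases x <;> simp_all

-- A's three set-membership tests compute exactly the rank of B's accumulated max severity
theorem grade_translate (t : List (List (String × Option String))) :
    (if PySem.Set.contains (PySem.Set.ofList (t.map pvGr)) (some "f") then ("below_d" : String)
     else if PySem.Set.contains (PySem.Set.ofList (t.map pvGr)) (some "d") then "below_c"
     else if PySem.Set.contains (PySem.Set.ofList (t.map pvGr)) (some "c") then "below_b"
     else "unknown")
    = (if t.foldl (fun a r => max a (pvSev r)) 0 == 3 then "below_d"
       else if t.foldl (fun a r => max a (pvSev r)) 0 == 2 then "below_c"
       else if t.foldl (fun a r => max a (pvSev r)) 0 == 1 then "below_b"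
       else "unknown") := by
  have hm : t.foldl (fun a r => max a (pvSev r)) 0 = (t.map pvSev).foldl max 0 := by
    rw [List.foldl_map]
  have hb : ∀ x ∈ t.map pvSev, x ≤ 3 := by
    intro x hx
    rcases List.mem_map.mp hx with ⟨r, _, rfl⟩
    exact pvSev_le r
  have e3 : (3 : Nat) ∈ t.map pvSev ↔ some "f" ∈ t.map pvGr := by
    simp [List.mem_map, pvSev_eq_3]
  have e2 : (2 : Nat) ∈ t.map pvSev ↔ some "d" ∈ t.map pvGr := by
    simp [List.mem_map, pvSev_eq_2]
  have e1 : (1 : Nat) ∈ t.map pvSev ↔ some "c" ∈ t.map pvGr := by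
    simp [List.mem_map, pvSev_eq_1]
  rw [hm, max_rank _ hb]
  by_cases c3 : some "f" ∈ t.map pvGr <;> by_cases c2 : some "d" ∈ t.map pvGr <;>
    by_cases c1 : some "c" ∈ t.map pvGr <;>
    simp [PySem.Set.mem_ofList, e3, e2, e1, c3, c2, c1]

-- on a nonempty reasons list, A's all/all/any chain collapses to B's two booleans
theorem issue_translate (x : List (String × Option String)) (t : List (List (String × Option String))) :
    (if (x :: t).all (fun r => pvRs r == some "missing_work") then ("missing_multiple" : String)
     else if (x :: t).all (fun r => pvRs r == some "academic_underpreparedness") then "no_issue"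
     else if (x :: t).any (fun r => pvRs r == some "missing_work") then "missing_multiple"
     else "unknown")
    = (if (x :: t).all (fun r => pvRs r == some "academic_underpreparedness") then "no_issue"
       else if (x :: t).any (fun r => pvRs r == some "missing_work") then "missing_multiple"
       else "unknown") := by
  by_cases hall : (x :: t).all (fun r => pvRs r == some "missing_work") = true
  · have hx : pvRs x = some "missing_work" := by
      simp only [List.all_cons, Bool.and_eq_true, beq_iff_eq] at hall
      exact hall.1
    simp [hall, List.all_cons, List.any_cons, hx]
  · simp [hall]

-- ===== VERDICT (by name: the statement is the Claim_ definition above) =====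
theorem build_student_query_spec : Claim_equal_build_student_query := by
  intro tr _ _
  unfold Spec_build_student_query
  simp only [build_student_query, build_student_query_alt]
  rw [bsq_fold]
  simp only [show (fun (r : List (String × Option String)) => ((PySem.Dict.mk r).getD "failure_risk" none).isSome) = pvFl from rfl,
             show (fun (r : List (String × Option String)) => (PySem.Dict.mk r).getD "predicted_grade" none) = pvGr from rfl,
             show (fun (r : List (String × Option String)) => (PySem.Dict.mk r).getD "failure_risk_reason" none) = pvRs from rfl]
  cases hfl : ((PySem.Dict.mk tr).getD "student_results" []).filter pvFl with
  | nil => simp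
  | cons x t =>
      simp only [List.isEmpty_cons, Bool.not_false, Bool.or_true, Bool.not_true, Bool.false_or,
                 Bool.true_and, if_neg (by simp : ¬ (false : Bool) = true)]
      rw [grade_translate]
      simp only [List.all_map, List.any_map, Function.comp_def]
      rw [issue_translate]
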